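-- pv_equiv track=rewrite | github.com/bytedance/CanRisk-AI | scripts/base.py | merge_chunks
-- ===== SOURCE A (Python) =====
-- def merge_chunks(strings, min_length=500, max_length=1200):
--     """
--     Merge the elements in the list of strings, ensuring that the sum of the lengths of any two adjacent elements is not less than 1200.
--     Parameters:
--         strings (list): A list containing strings.
--     Returns:
--         list: The merged list of strings.
--     """
--     if not strings:
--         return []
--
--     result = []
--     current_string = ""
--
--     for string in strings:
--         if len(string) < min_length:
--             if len(current_string) + len(string) < max_length:
--                 current_string += "\n" + string if current_string else string
--             else:
--                 result.append(current_string)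
--                 current_string = string
--         else:
--             if current_string:
--                 result.append(current_string)
--                 current_string = ""
--             result.append(string)
--
--     if current_string:
--         result.append(current_string)
--
--     while len(result) > 1:
--         merged = False
--         for i in range(len(result) - 1):
--             if len(result[i]) + len(result[i + 1]) < max_length:
--                 result[i] += "\n" + result[i + 1]
--                 del result[i + 1]
--                 merged = True
--                 break
--         if not merged:
--             break
--
--     return result
-- ===== SOURCE B (Python) =====
-- def merge_chunks(strings, min_length=500, max_length=1200):
--     """Same result as the original, in one pass per phase: chunks are kept as
--     lists of pieces with their joined length tracked incrementally, and the
--     leftmost-pair rescan loop is replaced by a single greedy sweep."""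
--     # phase 1: group consecutive short strings (long strings become their own chunk)
--     chunks = []          # list of (parts, joined_length); "\n".join(parts) is the chunk
--     parts, plen = [], 0  # current group; plen == len("\n".join(parts)) and plen > 0 iff it is non-empty
--     for s in strings:
--         if len(s) < min_length:
--             if plen + len(s) < max_length:
--                 if plen == 0:
--                     parts, plen = [s], len(s)
--                 else:
--                     parts.append(s)
--                     plen += 1 + len(s)
--             else:
--                 chunks.append((parts or [""], plen))
--                 parts, plen = [s], len(s)
--         else:
--             if plen > 0:
--                 chunks.append((parts, plen))
--                 parts, plen = [], 0
--             chunks.append(([s], len(s)))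
--     if plen > 0:
--         chunks.append((parts, plen))
--     if not chunks:
--         return []
--     # phase 2: one greedy left-to-right sweep (equivalent to the original's
--     # restart-from-zero loop, since merging never makes an earlier pair mergeable)
--     out = []
--     gparts, glen = list(chunks[0][0]), chunks[0][1]
--     rest = chunks[1:]
--     for p, l in rest:
--         if glen + l < max_length:
--             gparts += p
--             glen += 1 + l
--         else:
--             out.append("\n".join(gparts))
--             gparts, glen = list(p), l
--     out.append("\n".join(gparts))
--     return out
-- ===== Notes on version B (the rewrite author's own statement) =====
-- stated objective: alternative
-- what changed: Replaces the restart-from-zero leftmost-pair rescan loop (with repeated string concatenation) by a single greedy left-to-right sweep over chunks kept as piece lists with incrementally tracked joined lengths, joining each output chunk once.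
import Mathlib
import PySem

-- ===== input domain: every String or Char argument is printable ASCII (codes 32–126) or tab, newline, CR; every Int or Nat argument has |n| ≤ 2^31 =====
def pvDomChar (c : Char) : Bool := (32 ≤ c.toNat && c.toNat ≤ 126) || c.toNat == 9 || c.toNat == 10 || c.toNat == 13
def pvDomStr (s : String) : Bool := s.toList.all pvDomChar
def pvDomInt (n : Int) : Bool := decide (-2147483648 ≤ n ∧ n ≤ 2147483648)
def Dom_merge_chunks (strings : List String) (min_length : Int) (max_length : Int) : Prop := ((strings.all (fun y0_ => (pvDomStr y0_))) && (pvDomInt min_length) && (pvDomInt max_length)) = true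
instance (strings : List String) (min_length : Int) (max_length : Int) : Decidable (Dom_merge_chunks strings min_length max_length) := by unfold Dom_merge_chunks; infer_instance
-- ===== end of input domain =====

-- B replaces A's restart-from-zero pair-merging loop (with repeated string concatenation)
-- by a single greedy left-to-right sweep over chunks kept as piece lists with incrementally
-- tracked lengths; same return value.


-- ===== PORT A =====
-- A's first for-loop: state (result, current_string), folded left over the strings.
def mcPhase1 (mn mx : Int) : List String → List String → String → List String × String
  | [], res, cur => (res, cur)
  | s :: rest, res, cur =>
    if PySem.Str.len s < mn then
      if PySem.Str.len cur + PySem.Str.len s < mx then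
        mcPhase1 mn mx rest res (if cur ≠ "" then cur ++ "\n" ++ s else s)
      else
        mcPhase1 mn mx rest (res ++ [cur]) s
    else
      mcPhase1 mn mx rest ((if cur ≠ "" then res ++ [cur] else res) ++ [s]) ""

-- A's inner 'for i in range(len(result)-1)': find the leftmost adjacent mergeable pair,
-- merge it and stop (none = no pair merged, i.e. 'merged' stayed False).
def mcScan (mx : Int) : List String → Option (List String)
  | a :: b :: rest =>
    if PySem.Str.len a + PySem.Str.len b < mx then some ((a ++ "\n" ++ b) :: rest)
    else (mcScan mx (b :: rest)).map (fun r => a :: r)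
  | _ => none

theorem mcScan_some_length (mx : Int) : ∀ (l l' : List String), mcScan mx l = some l' → l'.length + 1 = l.length := by
  intro l
  induction l with
  | nil => intro l' h; simp [mcScan] at h
  | cons a t ih =>
    intro l' h
    match t with
    | [] => simp [mcScan] at h
    | b :: rest =>
      simp only [mcScan] at h
      split at h
      · cases h; simp
      · simp only [Option.map_eq_some_iff] at h
        obtain ⟨r, hr, rfl⟩ := h
        have := ih r hr
        simp at this ⊢
        omega

-- A's 'while len(result) > 1' loop.
def mcLoop (mx : Int) (res : List String) : List String :=
  if 1 < res.length then
    match h : mcScan mx res with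
    | some res' => mcLoop mx res'
    | none => res
  else res
termination_by res.length
decreasing_by
  have := mcScan_some_length mx res res' h
  omega

def merge_chunks (strings : List String) (min_length : Int) (max_length : Int) : List String :=
  if strings = [] then []
  else
    let p := mcPhase1 min_length max_length strings [] ""
    mcLoop max_length (if p.2 ≠ "" then p.1 ++ [p.2] else p.1)

-- ===== PORT B =====
def mcJoin (parts : List String) : String := PySem.Str.join "\n" parts

-- Source B phase 1: chunks as (piece list, joined length), lengths tracked incrementally.
def mcChunks (mn mx : Int) : List String → List (List String × Int) → List String → Int → List (List String × Int)
  | [], chunks, parts, plen => if 0 < plen then chunks ++ [(parts, plen)] else chunks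
  | s :: rest, chunks, parts, plen =>
    if PySem.Str.len s < mn then
      if plen + PySem.Str.len s < mx then
        if plen = 0 then mcChunks mn mx rest chunks [s] (PySem.Str.len s)
        else mcChunks mn mx rest chunks (parts ++ [s]) (plen + 1 + PySem.Str.len s)
      else
        mcChunks mn mx rest (chunks ++ [(if parts = [] then [""] else parts, plen)]) [s] (PySem.Str.len s)
    else
      mcChunks mn mx rest ((if 0 < plen then chunks ++ [(parts, plen)] else chunks) ++ [([s], PySem.Str.len s)]) [] 0

-- Source B phase 2: one greedy left-to-right sweep, joining each finished chunk once.
def mcSweep (mx : Int) : List (List String × Int) → List String → Int → List String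
  | [], gparts, _ => [mcJoin gparts]
  | (p, l) :: rest, gparts, glen =>
    if glen + l < mx then mcSweep mx rest (gparts ++ p) (glen + 1 + l)
    else mcJoin gparts :: mcSweep mx rest p l

def merge_chunks_alt (strings : List String) (min_length : Int) (max_length : Int) : List String :=
  match mcChunks min_length max_length strings [] [] 0 with
  | [] => []
  | (p, l) :: rest => mcSweep max_length rest p l

-- ===== PRECONDITION & SPEC =====
def Spec_merge_chunks (strings : List String) (min_length : Int) (max_length : Int) (out : List String) : Prop := out = merge_chunks_alt strings min_length max_length
instance (strings : List String) (min_length : Int) (max_length : Int) (out : List String) : Decidable (Spec_merge_chunks strings min_length max_length out) := by unfold Spec_merge_chunks; infer_instance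

-- ===== CLAIM (what is proved, stated in full; the proofs are below) =====
def Claim_equal_merge_chunks : Prop := ∀ (strings : List String) (min_length : Int) (max_length : Int), Dom_merge_chunks strings min_length max_length → Spec_merge_chunks strings min_length max_length (merge_chunks strings min_length max_length)

-- ===== LEMMAS AND PROOFS =====

theorem mcLen_nonneg (s : String) : 0 ≤ PySem.Str.len s := by
  rw [PySem.Str.len_eq]; exact Int.natCast_nonneg _

theorem mcLen_eq_zero_iff (s : String) : PySem.Str.len s = 0 ↔ s = "" := by
  rw [PySem.Str.len_eq]
  constructor
  · intro h
    exact String.toList_eq_nil_iff.mp (List.length_eq_zero_iff.mp (by exact_mod_cast h))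
  · intro h; subst h; rfl

theorem mcLen_cat (a b : String) : PySem.Str.len (a ++ "\n" ++ b) = PySem.Str.len a + 1 + PySem.Str.len b := by
  have h1 : PySem.Str.len "\n" = 1 := by decide
  rw [PySem.Str.len_append, PySem.Str.len_append, h1]

theorem mcJoin_nil : mcJoin [] = "" := rfl

theorem mcJoin_singleton (s : String) : mcJoin [s] = s := by
  simp [mcJoin, PySem.Str.join]

theorem charsJoin_append (sep : List Char) : ∀ (A B : List (List Char)), A ≠ [] → B ≠ [] →
    PySem.Chars.join sep (A ++ B) = PySem.Chars.join sep A ++ sep ++ PySem.Chars.join sep B := by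
  intro A
  induction A with
  | nil => intro B hA _; exact absurd rfl hA
  | cons a A' ih =>
    intro B hA hB
    match A' with
    | [] =>
      match B with
      | b :: B' => simp [PySem.Chars.join_singleton, PySem.Chars.join_cons_cons]
    | a2 :: A'' =>
      have h1 : (a2 :: A'') ++ B ≠ [] := by simp
      calc PySem.Chars.join sep ((a :: a2 :: A'') ++ B)
          = a ++ sep ++ PySem.Chars.join sep ((a2 :: A'') ++ B) := by
            match B with
            | b :: B' => simp [PySem.Chars.join_cons_cons]
        _ = a ++ sep ++ (PySem.Chars.join sep (a2 :: A'') ++ sep ++ PySem.Chars.join sep B) := by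
            rw [ih B (by simp) hB]
        _ = PySem.Chars.join sep (a :: a2 :: A'') ++ sep ++ PySem.Chars.join sep B := by
            rw [PySem.Chars.join_cons_cons]
            simp [List.append_assoc]

theorem mcJoin_append (A B : List String) (hA : A ≠ []) (hB : B ≠ []) :
    mcJoin (A ++ B) = mcJoin A ++ "\n" ++ mcJoin B := by
  apply String.toList_inj.mp
  simp only [mcJoin, PySem.Str.toList_join, String.toList_append, List.map_append]
  rw [charsJoin_append _ _ _ (by simpa using hA) (by simpa using hB)]

theorem mcJoin_append_singleton (A : List String) (s : String) (hA : A ≠ []) :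
    mcJoin (A ++ [s]) = mcJoin A ++ "\n" ++ s := by
  rw [mcJoin_append A [s] hA (by simp), mcJoin_singleton]

theorem mcJoin_ne_nil_of_len_pos (A : List String) (h : mcJoin A ≠ "") : A ≠ [] := by
  intro hA; subst hA; exact h mcJoin_nil

-- the chunk invariant: pieces non-empty, recorded length is the joined length
def mcGood (c : List String × Int) : Prop := c.1 ≠ [] ∧ c.2 = PySem.Str.len (mcJoin c.1)

-- string-level greedy sweep (bridge between mcLoop and mcSweep)
def mcGreedy (mx : Int) : List String → String → List String
  | [], cur => [cur]
  | s :: rest, cur =>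
    if PySem.Str.len cur + PySem.Str.len s < mx then mcGreedy mx rest (cur ++ "\n" ++ s)
    else cur :: mcGreedy mx rest s

theorem mcSweep_eq_greedy (mx : Int) : ∀ (chunks : List (List String × Int)) (gparts : List String),
    (∀ c ∈ chunks, mcGood c) → gparts ≠ [] →
    mcSweep mx chunks gparts (PySem.Str.len (mcJoin gparts)) =
      mcGreedy mx (chunks.map (fun c => mcJoin c.1)) (mcJoin gparts) := by
  intro chunks
  induction chunks with
  | nil => intro gparts _ _; simp [mcSweep, mcGreedy]
  | cons c rest ih =>
    intro gparts hgood hg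
    obtain ⟨p, l⟩ := c
    have hc : mcGood (p, l) := hgood _ (by simp)
    obtain ⟨hp, hl⟩ := hc
    simp only [mcSweep, mcGreedy, List.map_cons]
    rw [show l = PySem.Str.len (mcJoin p) from hl]
    split
    · have hj : mcJoin (gparts ++ p) = mcJoin gparts ++ "\n" ++ mcJoin p :=
        mcJoin_append gparts p hg hp
      have hlen : PySem.Str.len (mcJoin gparts) + 1 + PySem.Str.len (mcJoin p)
          = PySem.Str.len (mcJoin (gparts ++ p)) := by rw [hj, mcLen_cat]
      rw [hlen, ih (gparts ++ p) (fun c hc => hgood c (by simp [hc])) (by simp [hp]), hj]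
    · rw [ih p (fun c hc => hgood c (by simp [hc])) hp]

-- phase-1 correspondence
theorem mcNorm_join (parts : List String) :
    mcJoin (if parts = [] then [""] else parts) = mcJoin parts := by
  split
  · rename_i h; subst h; rw [mcJoin_singleton, mcJoin_nil]
  · rfl

theorem mcPhase1_eq (mn mx : Int) : ∀ (rest : List String) (chunks : List (List String × Int)) (parts : List String),
    (∀ c ∈ chunks, mcGood c) →
    ((if (mcPhase1 mn mx rest (chunks.map (fun c => mcJoin c.1)) (mcJoin parts)).2 ≠ "" then
        (mcPhase1 mn mx rest (chunks.map (fun c => mcJoin c.1)) (mcJoin parts)).1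
          ++ [(mcPhase1 mn mx rest (chunks.map (fun c => mcJoin c.1)) (mcJoin parts)).2]
      else (mcPhase1 mn mx rest (chunks.map (fun c => mcJoin c.1)) (mcJoin parts)).1)
      = (mcChunks mn mx rest chunks parts (PySem.Str.len (mcJoin parts))).map (fun c => mcJoin c.1)
    ∧ ∀ c ∈ mcChunks mn mx rest chunks parts (PySem.Str.len (mcJoin parts)), mcGood c) := by
  intro rest
  induction rest with
  | nil =>
    intro chunks parts hgood
    simp only [mcPhase1, mcChunks]
    by_cases h0 : mcJoin parts = ""
    · rw [if_neg (by simp [h0]), if_neg (by rw [h0]; decide)]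
      exact ⟨rfl, hgood⟩
    · have hne : ¬ PySem.Str.len (mcJoin parts) = 0 :=
        fun h => h0 ((mcLen_eq_zero_iff _).mp h)
      have hnn := mcLen_nonneg (mcJoin parts)
      rw [if_pos h0, if_pos (by omega : 0 < PySem.Str.len (mcJoin parts))]
      refine ⟨by simp, ?_⟩
      intro c hc
      rcases List.mem_append.mp hc with h | h
      · exact hgood c h
      · rw [List.mem_singleton] at h
        subst h
        exact ⟨mcJoin_ne_nil_of_len_pos parts h0, rfl⟩
  | cons s rest ih =>
    intro chunks parts hgood
    simp only [mcPhase1, mcChunks]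
    by_cases h1 : PySem.Str.len s < mn
    · rw [if_pos h1, if_pos h1]
      by_cases h2 : PySem.Str.len (mcJoin parts) + PySem.Str.len s < mx
      · rw [if_pos h2, if_pos h2]
        by_cases h0 : mcJoin parts = ""
        · rw [h0]
          rw [if_neg (show ¬ ("" : String) ≠ "" by simp)]
          rw [if_pos (show PySem.Str.len "" = 0 by decide)]
          have := ih chunks [s] hgood
          rw [mcJoin_singleton] at this
          exact this
        · have hne : ¬ PySem.Str.len (mcJoin parts) = 0 :=
            fun h => h0 ((mcLen_eq_zero_iff _).mp h)
          rw [if_neg hne, if_pos h0]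
          have hp : parts ≠ [] := mcJoin_ne_nil_of_len_pos parts h0
          have := ih chunks (parts ++ [s]) hgood
          rw [mcJoin_append_singleton parts s hp] at this
          rw [mcLen_cat] at this
          exact this
      · rw [if_neg h2, if_neg h2]
        have hgood' : ∀ c ∈ chunks ++ [(if parts = [] then [""] else parts, PySem.Str.len (mcJoin parts))], mcGood c := by
          intro c hc
          rcases List.mem_append.mp hc with h | h
          · exact hgood c h
          · rw [List.mem_singleton] at h
            subst h
            refine ⟨?_, by simp only [mcNorm_join]⟩
            split
            · simp
            · assumption
        have := ih (chunks ++ [(if parts = [] then [""] else parts, PySem.Str.len (mcJoin parts))]) [s] hgood'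
        rw [mcJoin_singleton] at this
        rw [List.map_append] at this
        simp only [List.map_cons, List.map_nil, mcNorm_join] at this
        exact this
    · rw [if_neg h1, if_neg h1]
      by_cases h0 : mcJoin parts = ""
      · have hz : PySem.Str.len (mcJoin parts) = 0 := (mcLen_eq_zero_iff _).mpr h0
        rw [if_neg (show ¬ (mcJoin parts ≠ "") from fun h => h h0)]
        rw [if_neg (show ¬ 0 < PySem.Str.len (mcJoin parts) by omega)]
        have hgood' : ∀ c ∈ chunks ++ [([s], PySem.Str.len s)], mcGood c := by
          intro c hc
          rcases List.mem_append.mp hc with h | h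
          · exact hgood c h
          · rw [List.mem_singleton] at h
            subst h
            exact ⟨by simp, by simp only [mcJoin_singleton]⟩
        have := ih (chunks ++ [([s], PySem.Str.len s)]) [] hgood'
        rw [mcJoin_nil] at this
        rw [List.map_append] at this
        simp only [List.map_cons, List.map_nil, mcJoin_singleton] at this
        rw [show PySem.Str.len "" = 0 by decide] at this
        exact this
      · have hne : ¬ PySem.Str.len (mcJoin parts) = 0 :=
          fun h => h0 ((mcLen_eq_zero_iff _).mp h)
        have hnn := mcLen_nonneg (mcJoin parts)
        rw [if_pos h0, if_pos (by omega : 0 < PySem.Str.len (mcJoin parts))]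
        have hgood' : ∀ c ∈ (chunks ++ [(parts, PySem.Str.len (mcJoin parts))]) ++ [([s], PySem.Str.len s)], mcGood c := by
          intro c hc
          rcases List.mem_append.mp hc with h | h
          · rcases List.mem_append.mp h with h' | h'
            · exact hgood c h'
            · rw [List.mem_singleton] at h'
              subst h'
              exact ⟨mcJoin_ne_nil_of_len_pos parts h0, rfl⟩
          · rw [List.mem_singleton] at h
            subst h
            exact ⟨by simp, by simp only [mcJoin_singleton]⟩
        have := ih ((chunks ++ [(parts, PySem.Str.len (mcJoin parts))]) ++ [([s], PySem.Str.len s)]) [] hgood'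
        rw [mcJoin_nil] at this
        rw [List.map_append, List.map_append] at this
        simp only [List.map_cons, List.map_nil, mcJoin_singleton] at this
        rw [show PySem.Str.len "" = 0 by decide] at this
        exact this

theorem mcScan_head (mx : Int) (b : String) : ∀ (t l' : List String), mcScan mx (b :: t) = some l' →
    ∃ b' t', l' = b' :: t' ∧ PySem.Str.len b ≤ PySem.Str.len b' := by
  intro t l' h
  match t with
  | [] => simp [mcScan] at h
  | c :: t2 =>
    simp only [mcScan] at h
    split at h
    · cases h
      refine ⟨b ++ "\n" ++ c, t2, rfl, ?_⟩
      rw [mcLen_cat]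
      have := mcLen_nonneg c
      omega
    · simp only [Option.map_eq_some_iff] at h
      obtain ⟨r, _, rfl⟩ := h
      exact ⟨b, r, rfl, le_refl _⟩

theorem mcLoop_of_some (mx : Int) (res res' : List String) (h : mcScan mx res = some res')
    (hl : 1 < res.length) : mcLoop mx res = mcLoop mx res' := by
  rw [mcLoop, if_pos hl]
  split
  · rename_i r hr
    rw [h] at hr
    cases hr
    rfl
  · rename_i hr
    rw [h] at hr
    cases hr

theorem mcLoop_of_none (mx : Int) (res : List String) (h : mcScan mx res = none) :
    mcLoop mx res = res := by
  rw [mcLoop]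
  split
  · split
    · rename_i r hr
      rw [h] at hr
      cases hr
    · rfl
  · rfl

theorem mcLoop_cons (mx : Int) : ∀ (n : Nat) (l : List String) (a : String), l.length ≤ n → l ≠ [] →
    ¬ (PySem.Str.len a + PySem.Str.len (l.headD "") < mx) →
    mcLoop mx (a :: l) = a :: mcLoop mx l := by
  intro n
  induction n with
  | zero =>
    intro l a hlen hne _
    exact absurd (List.length_eq_zero_iff.mp (Nat.le_zero.mp hlen)) hne
  | succ n ih =>
    intro l a hlen hne hcond
    match l with
    | b :: t =>
      have hcb : ¬ (PySem.Str.len a + PySem.Str.len b < mx) := hcond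
      have hscan : mcScan mx (a :: b :: t) = (mcScan mx (b :: t)).map (fun r => a :: r) := by
        simp only [mcScan]
        rw [if_neg hcb]
      cases hs2 : mcScan mx (b :: t) with
      | none =>
        have h1 : mcScan mx (a :: b :: t) = none := by rw [hscan, hs2]; rfl
        rw [mcLoop_of_none mx _ h1, mcLoop_of_none mx _ hs2]
      | some r =>
        have h1 : mcScan mx (a :: b :: t) = some (a :: r) := by rw [hscan, hs2]; rfl
        have hrlen : r.length + 1 = (b :: t).length := by
          have := mcScan_some_length mx (b :: t) r hs2
          simpa using this
        obtain ⟨b', t', rfl, hble⟩ := mcScan_head mx b t r hs2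
        rw [mcLoop_of_some mx _ _ h1 (by simp)]
        rw [mcLoop_of_some mx _ _ hs2 (by simp at hrlen ⊢; omega)]
        exact ih (b' :: t') a (by simp at hrlen hlen ⊢; omega) (by simp)
          (fun h => hcb (by simp only [List.headD_cons] at h ⊢; omega))
    | [] => exact absurd rfl hne

theorem mcLoop_eq_greedy (mx : Int) : ∀ (n : Nat) (rest : List String) (r : String), rest.length ≤ n →
    mcLoop mx (r :: rest) = mcGreedy mx rest r := by
  intro n
  induction n with
  | zero =>
    intro rest r hlen
    have : rest = [] := List.length_eq_zero_iff.mp (Nat.le_zero.mp hlen)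
    subst this
    rw [mcLoop]
    simp [mcGreedy]
  | succ n ih =>
    intro rest r hlen
    match rest with
    | [] =>
      rw [mcLoop]
      simp [mcGreedy]
    | b :: t =>
      by_cases hc : PySem.Str.len r + PySem.Str.len b < mx
      · have hscan : mcScan mx (r :: b :: t) = some ((r ++ "\n" ++ b) :: t) := by
          simp only [mcScan]
          rw [if_pos hc]
        rw [mcLoop_of_some mx _ _ hscan (by simp)]
        rw [ih t (r ++ "\n" ++ b) (by simp at hlen ⊢; omega)]
        rw [mcGreedy, if_pos hc]
      · rw [mcLoop_cons mx (b :: t).length (b :: t) r (le_refl _) (by simp)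
          (by simpa using hc)]
        rw [ih t b (by simp at hlen ⊢; omega)]
        rw [mcGreedy, if_neg hc]

-- ===== VERDICT (by name: the statement is the Claim_ definition above) =====
theorem merge_chunks_spec : Claim_equal_merge_chunks := by
  intro strings mn mx _
  unfold Spec_merge_chunks merge_chunks merge_chunks_alt
  by_cases hs : strings = []
  · subst hs; simp [mcChunks]
  · simp only [if_neg hs]
    have h0 : PySem.Str.len (mcJoin ([] : List String)) = 0 := by rw [mcJoin_nil]; rfl
    have := mcPhase1_eq mn mx strings [] [] (by simp)
    rw [h0] at this
    simp only [List.map_nil, mcJoin_nil] at this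
    obtain ⟨hfin, hgood⟩ := this
    rw [hfin]
    match hch : mcChunks mn mx strings [] [] 0 with
    | [] => simp [mcLoop]
    | (p, l) :: rest =>
      rw [hch] at hgood
      have hp : mcGood (p, l) := hgood _ (by simp)
      obtain ⟨hp1, hp2⟩ := hp
      simp only [List.map_cons]
      rw [mcLoop_eq_greedy mx (rest.map (fun c => mcJoin c.1)).length _ _ (le_refl _)]
      rw [← mcSweep_eq_greedy mx rest p (fun c hc => hgood c (by simp [hc])) hp1, ← hp2]
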